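-- pv_equiv track=rewrite | github.com/olgapashneva/pythoniasa19fall | assignment04.py | task3
-- ===== SOURCE A (Python) =====
-- def task3(text):
--     """
--     Calculate the number of different letters and digits in the text.
--
--     >>> task3('To study and not think is a waste. To think and not study is dangerous. (Confucius, The Analects, Chapter 1)')
--     {'digits': 1, 'letters': 22}
--
--     >>> task3('Найди себе дело по душе и тебе не придётся трудиться ни одного дня в жизни. (Конфуций)')
--     {'digits': 0, 'letters': 26}
--     """
--     unique_val = ''.join(set(text))
--     digits = 0
--     letters = 0
--     for i in unique_val:
--         if i.isnumeric() is True: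
--             digits += 1
--         elif i.isalpha() is True:
--             letters +=1
--     return {'digits': digits, 'letters': letters}
-- ===== SOURCE B (Python) =====
-- def task3(text):
--     digits = 0
--     letters = 0
--     prev = None
--     for c in sorted(text):
--         if c != prev:
--             if c.isnumeric():
--                 digits += 1
--             elif c.isalpha():
--                 letters += 1
--             prev = c
--     return {'digits': digits, 'letters': letters}
-- ===== Notes on version B (the rewrite author's own statement) =====
-- stated objective: alternative
-- what changed: B replaces A's hash-set deduplication (build set(text), then classify each unique char) by sort-then-scan: sort the characters and make one linear pass that classifies a char only when it differs from its predecessor, so duplicates are skipped by adjacency instead of by a hash set.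
import Mathlib
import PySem

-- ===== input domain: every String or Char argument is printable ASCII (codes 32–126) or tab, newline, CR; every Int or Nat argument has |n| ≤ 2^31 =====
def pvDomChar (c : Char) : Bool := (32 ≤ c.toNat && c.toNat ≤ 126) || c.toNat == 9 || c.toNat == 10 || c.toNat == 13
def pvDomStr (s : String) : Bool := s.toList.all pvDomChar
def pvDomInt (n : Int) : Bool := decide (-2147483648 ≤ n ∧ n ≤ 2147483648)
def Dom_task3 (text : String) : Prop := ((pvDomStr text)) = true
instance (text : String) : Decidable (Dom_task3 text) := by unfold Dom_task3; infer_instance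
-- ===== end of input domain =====

-- B replaces A's hash-set deduplication by sort-then-scan: sort the characters and classify a
-- char only when it differs from its predecessor. Same result; O(n log n) vs O(n), not faster.
-- (On the ASCII domain str.isnumeric coincides with PySem.Chars.isdigit.)

-- ===== PORT A =====
-- unique_val = ''.join(set(text)); loop over it with two counters (the counts are
-- independent of the set's iteration order, so iterating PySem.Set.ofList is exact here).
def task3 (text : String) : List (String × Int) :=
  let unique_val : List Char := PySem.Set.ofList text.toList
  let counts : Int × Int := unique_val.foldl
    (fun (p : Int × Int) i =>
      if PySem.Chars.isdigit i then (p.1 + 1, p.2)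
      else if PySem.Chars.isalpha i then (p.1, p.2 + 1)
      else p) (0, 0)
  [("digits", counts.1), ("letters", counts.2)]

-- ===== PORT B =====
-- the 'for c in sorted(text)' loop of Source B, as structural recursion over the sorted list,
-- carrying (prev, digits, letters)
def task3AltScan (prev : Option Char) (digits letters : Int) : List Char → Int × Int
  | [] => (digits, letters)
  | c :: rest =>
    if some c ≠ prev then
      if PySem.Chars.isdigit c then task3AltScan (some c) (digits + 1) letters rest
      else if PySem.Chars.isalpha c then task3AltScan (some c) digits (letters + 1) rest
      else task3AltScan (some c) digits letters rest
    else task3AltScan prev digits letters rest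

def task3_alt (text : String) : List (String × Int) :=
  let counts := task3AltScan none 0 0 (PySem.List.sorted text.toList (fun c => c) false)
  [("digits", counts.1), ("letters", counts.2)]

-- ===== PRECONDITION & SPEC =====
def Spec_task3 (text : String) (out : List (String × Int)) : Prop := out = task3_alt text
instance (text : String) (out : List (String × Int)) : Decidable (Spec_task3 text out) := by unfold Spec_task3; infer_instance

-- ===== CLAIM (what is proved, stated in full; the proofs are below) =====
def Claim_equal_task3 : Prop := ∀ (text : String), Dom_task3 text → Spec_task3 text (task3 text)

-- ===== LEMMAS AND PROOFS =====

-- A's counting loop computes the two countP's of the list it folds over.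
theorem pv_fold_counts (s : List Char) (a b : Int) :
    s.foldl (fun (p : Int × Int) i =>
      if PySem.Chars.isdigit i then (p.1 + 1, p.2)
      else if PySem.Chars.isalpha i then (p.1, p.2 + 1)
      else p) (a, b)
    = (a + (s.countP (fun c => PySem.Chars.isdigit c) : Int),
       b + (s.countP (fun c => PySem.Chars.isalpha c && !PySem.Chars.isdigit c) : Int)) := by
  induction s generalizing a b with
  | nil => simp
  | cons x xs ih =>
    by_cases hd : PySem.Chars.isdigit x
    · simp [hd, ih]; ring
    · by_cases ha : PySem.Chars.isalpha x
      · simp [hd, ha, ih]; ring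
      · simp [hd, ha, ih]

-- countP p over a nodup list = card of the Finset of its members satisfying p
theorem pv_countP_nodup (p : Char → Bool) (l : List Char) (h : l.Nodup) :
    l.countP p = (l.filter p).toFinset.card := by
  rw [List.countP_eq_length_filter, List.toFinset_card_of_nodup (h.filter p)]

-- |insert x S| = 1 + |S \ {x}|
theorem pv_card_insert_erase {a : Type} [DecidableEq a] (x : a) (S : Finset a) :
    (insert x S).card = 1 + (S.erase x).card := by
  by_cases h : x ∈ S
  · have h1 : 1 ≤ S.card := Finset.card_pos.mpr ⟨x, h⟩
    rw [Finset.card_insert_of_mem h, Finset.card_erase_of_mem h]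
    omega
  · rw [Finset.card_insert_of_notMem h, Finset.erase_eq_of_notMem h]
    omega

-- B's scan over a sorted list counts, per category, the distinct chars other than prev.
theorem pv_scan_counts (s : List Char) (hs : s.Pairwise (· ≤ ·))
    (prev : Option Char) (hp : ∀ c ∈ s, ∀ q, prev = some q → q ≤ c)
    (a b : Int) :
    task3AltScan prev a b s =
      (a + ((s.filter (fun c => PySem.Chars.isdigit c && some c ≠ prev)).toFinset.card : Int),
       b + ((s.filter (fun c => (PySem.Chars.isalpha c && !PySem.Chars.isdigit c) && some c ≠ prev)).toFinset.card : Int)) := by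
  induction s generalizing prev a b with
  | nil => simp [task3AltScan]
  | cons x xs ih =>
    have hx : ∀ c ∈ xs, x ≤ c := fun c hc => (List.pairwise_cons.mp hs).1 c hc
    have hxs : xs.Pairwise (· ≤ ·) := (List.pairwise_cons.mp hs).2
    by_cases hne : some x ≠ prev
    · -- x is classified; afterwards prev = x
      have hp' : ∀ c ∈ xs, ∀ q, (some x : Option Char) = some q → q ≤ c := by
        rintro c hc q hq
        cases hq; exact hx c hc
      have hkey : ∀ (q : Char → Bool),
          ((x :: xs).filter (fun c => q c && some c ≠ prev)).toFinset.card
            = (if q x then 1 else 0) + ((xs.filter (fun c => q c && some c ≠ some x)).toFinset.card) := by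
        intro q
        have hmemeq : (xs.filter (fun c => q c && some c ≠ some x)).toFinset
            = ((xs.filter (fun c => q c && some c ≠ prev)).toFinset).erase x := by
          apply Finset.ext; intro c
          simp only [Finset.mem_erase, List.mem_toFinset, List.mem_filter,
            Bool.and_eq_true, decide_eq_true_eq, ne_eq, Option.some.injEq]
          constructor
          · rintro ⟨hc, hq, hcx⟩
            refine ⟨hcx, hc, hq, ?_⟩
            intro hcp
            have h1 : c ≤ x := hp x (List.mem_cons_self ..) c hcp.symm
            have h2 : x ≤ c := hx c hc
            exact hcx (le_antisymm h1 h2)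
          · rintro ⟨hcx, hc, hq, _⟩
            exact ⟨hc, hq, hcx⟩
        by_cases hqx : q x
        · have hfx : (x :: xs).filter (fun c => q c && some c ≠ prev)
              = x :: xs.filter (fun c => q c && some c ≠ prev) := by
            rw [List.filter_cons]
            simp [hqx, hne]
          rw [hfx, if_pos hqx, List.toFinset_cons, pv_card_insert_erase, hmemeq]
        · have hfx : (x :: xs).filter (fun c => q c && some c ≠ prev)
              = xs.filter (fun c => q c && some c ≠ prev) := by
            rw [List.filter_cons]; simp [hqx]
          rw [hfx, if_neg hqx, hmemeq]
          have hnx : x ∉ (xs.filter (fun c => q c && some c ≠ prev)).toFinset := by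
            simp only [List.mem_toFinset, List.mem_filter, Bool.and_eq_true]
            rintro ⟨-, hq, -⟩; exact hqx hq
          rw [Finset.erase_eq_of_notMem hnx]
          omega
      cases hd : PySem.Chars.isdigit x with
      | true =>
        simp only [task3AltScan]
        rw [if_pos hne, if_pos hd, ih hxs (some x) hp' (a + 1) b]
        rw [Prod.mk.injEq]
        constructor
        · rw [hkey]
          simp only [hd, if_true]
          push_cast; ring
        · rw [hkey]
          simp only [hd, Bool.not_true, Bool.and_false, Bool.false_eq_true, if_false]
          push_cast; ring
      | false =>
        cases ha : PySem.Chars.isalpha x with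
        | true =>
          simp only [task3AltScan]
          rw [if_pos hne, if_neg (by simp [hd]), if_pos ha, ih hxs (some x) hp' a (b + 1)]
          rw [Prod.mk.injEq]
          constructor
          · rw [hkey]
            simp only [hd, Bool.false_eq_true, if_false]
            push_cast; ring
          · rw [hkey]
            simp only [hd, ha, Bool.not_false, Bool.and_true, if_true]
            push_cast; ring
        | false =>
          simp only [task3AltScan]
          rw [if_pos hne, if_neg (by simp [hd]), if_neg (by simp [ha]), ih hxs (some x) hp' a b]
          rw [Prod.mk.injEq]
          constructor
          · rw [hkey]
            simp only [hd, Bool.false_eq_true, if_false]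
            push_cast; ring
          · rw [hkey]
            simp only [ha, Bool.false_and, Bool.false_eq_true, if_false]
            push_cast; ring
    · -- some x = prev: skipped; the filters drop x and prev stays some x
      rw [not_not] at hne
      subst hne
      have hfe : ∀ (q : Char → Bool),
          ((x :: xs).filter (fun c => q c && some c ≠ some x))
            = xs.filter (fun c => q c && some c ≠ some x) := by
        intro q; rw [List.filter_cons]; simp
      have hp' : ∀ c ∈ xs, ∀ q, (some x : Option Char) = some q → q ≤ c := by
        rintro c hc q hq; cases hq; exact hx c hc
      simp only [task3AltScan]
      rw [if_neg (by simp), ih hxs (some x) hp' a b, hfe, hfe]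

-- the two member-sets agree between any two char lists with the same membership
theorem pv_toFinset_filter_congr (p : Char → Bool) (u v : List Char)
    (h : ∀ c, c ∈ u ↔ c ∈ v) : (u.filter p).toFinset = (v.filter p).toFinset := by
  apply Finset.ext; intro c
  simp only [List.mem_toFinset, List.mem_filter, h]

-- ===== VERDICT (by name: the statement is the Claim_ definition above) =====
theorem task3_spec : Claim_equal_task3 := by
  intro text _
  show task3 text = task3_alt text
  unfold task3 task3_alt
  have hsorted := PySem.List.sorted_pairwise (xs := text.toList) (key := fun c : Char => c)
  have hscan := pv_scan_counts (PySem.List.sorted text.toList (fun c => c) false) hsorted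
    none (by intro c _ q hq; cases hq) 0 0
  simp only [hscan, pv_fold_counts, zero_add]
  have hmem : ∀ c : Char, c ∈ PySem.Set.ofList text.toList ↔
      c ∈ PySem.List.sorted text.toList (fun c => c) false := by
    intro c; rw [PySem.Set.mem_ofList, PySem.List.mem_sorted]
  have h1 : ∀ (q : Char → Bool),
      ((PySem.Set.ofList text.toList).countP q : Int)
        = (((PySem.List.sorted text.toList (fun c => c) false).filter
            (fun c => q c && some c ≠ none)).toFinset.card : Int) := by
    intro q
    rw [pv_countP_nodup q _ (PySem.Set.nodup_ofList text.toList)]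
    congr 1
    rw [pv_toFinset_filter_congr q _ _ hmem]
    congr 1
    apply Finset.ext; intro c
    simp
  rw [h1, h1]
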